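-- pv_equiv track=rewrite | github.com/gritmind/semantic-annotation | jupyter-notebook/feature_design_for_rules.py | is_sothatORif_leftside
-- ===== SOURCE A (Python) =====
-- def is_sothatORif_leftside(j_alpha, sentence):
--
--     featureVec = [0, 0]
--     sothatCheck = False
--     sothatIndex = -1
--     ifCheck = False
--     ifIndex = -1
--
--     for j in range(0, j_alpha):
--         if not j == len(sentence)-1:
--             if sentence[j] == 'so' and sentence[j+1] == 'that':
--                 sothatCheck = True
--                 sothatIndex = j
--
--     for j in range(0, j_alpha):
--         if sentence[j] == 'if' or sentence[j] == 'when': # when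
--             ifCheck = True
--             ifIndex = j
--
--     if sothatCheck == True and ifCheck == True:
--         if sothatIndex > ifIndex:
--             return [1, 0]
--         else:
--             return [0, 1]
--     elif sothatCheck == True and ifCheck == False:
--         return [1, 0]
--     elif sothatCheck == False and ifCheck == True:
--         return [0, 1]
--     else:
--         return [0, 0]
-- ===== SOURCE B (Python) =====
-- def is_sothatORif_leftside(j_alpha, sentence):
--     n = len(sentence)
--     for j in range(j_alpha - 1, -1, -1):
--         w = sentence[j]
--         if w == 'if' or w == 'when':
--             return [0, 1]
--         if w == 'so' and j + 1 < n and sentence[j + 1] == 'that':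
--             return [1, 0]
--     return [0, 0]
-- ===== Notes on version B (the rewrite author's own statement) =====
-- stated objective: simpler
-- what changed: Replaces the two forward scans accumulating last-match flags/indices plus a four-way maxima comparison with one backward scan from j_alpha-1 that returns at the first match (the two patterns are disjoint at any index, so the first backward match is exactly the larger of A's two last-match indices).
import Mathlib
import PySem

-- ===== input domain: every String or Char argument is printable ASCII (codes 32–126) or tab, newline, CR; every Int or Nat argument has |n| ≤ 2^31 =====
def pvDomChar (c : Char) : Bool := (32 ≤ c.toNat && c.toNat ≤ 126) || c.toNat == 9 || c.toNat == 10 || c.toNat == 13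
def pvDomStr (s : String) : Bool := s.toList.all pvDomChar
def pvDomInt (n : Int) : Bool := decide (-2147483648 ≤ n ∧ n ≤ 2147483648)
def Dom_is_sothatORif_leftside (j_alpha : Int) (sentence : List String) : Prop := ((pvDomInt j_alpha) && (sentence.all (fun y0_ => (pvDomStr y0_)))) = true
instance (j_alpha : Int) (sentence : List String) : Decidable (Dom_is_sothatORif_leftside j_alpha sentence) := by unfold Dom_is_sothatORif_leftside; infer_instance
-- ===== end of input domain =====

-- B replaces A's two forward scans + maxima comparison with one backward early-returning
-- scan (simpler decomposition, same asymptotic cost).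

-- ===== PORT A =====
-- step of A's first loop: track last j with sentence[j]=='so', sentence[j+1]=='that' (skipping j==len-1)
def pvStepSo (sentence : List String) (st : Bool × Int) (j : Int) : Bool × Int :=
  if j = (sentence.length : Int) - 1 then st
  else if (PySem.List.pyGet? sentence j).getD "" = "so" ∧
          (PySem.List.pyGet? sentence (j+1)).getD "" = "that" then (true, j)
  else st

-- step of A's second loop: track last j with sentence[j]=='if' or 'when'
def pvStepIf (sentence : List String) (st : Bool × Int) (j : Int) : Bool × Int :=
  if (PySem.List.pyGet? sentence j).getD "" = "if" ∨
     (PySem.List.pyGet? sentence j).getD "" = "when" then (true, j)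
  else st

-- A's final if-chain over the two (check, index) states
def pvDecide (s1 s2 : Bool × Int) : List Int :=
  if s1.1 = true ∧ s2.1 = true then
    (if s1.2 > s2.2 then [1, 0] else [0, 1])
  else if s1.1 = true ∧ s2.1 = false then [1, 0]
  else if s1.1 = false ∧ s2.1 = true then [0, 1]
  else [0, 0]

def is_sothatORif_leftside (j_alpha : Int) (sentence : List String) : List Int :=
  let st1 := (PySem.List.pyRange 0 j_alpha 1).foldl (pvStepSo sentence) (false, -1)
  let st2 := (PySem.List.pyRange 0 j_alpha 1).foldl (pvStepIf sentence) (false, -1)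
  pvDecide st1 st2

-- ===== PORT B =====
-- backward loop 'for j in range(j_alpha-1, -1, -1)' with early returns, as recursion on j
def pvAltGo (sentence : List String) (j : Int) : List Int :=
  if h : j < 0 then [0, 0]
  else
    let w := (PySem.List.pyGet? sentence j).getD ""
    if w = "if" ∨ w = "when" then [0, 1]
    else if w = "so" ∧ j + 1 < (sentence.length : Int) ∧
            (PySem.List.pyGet? sentence (j+1)).getD "" = "that" then [1, 0]
    else pvAltGo sentence (j - 1)
termination_by (j + 1).toNat
decreasing_by omega

def is_sothatORif_leftside_alt (j_alpha : Int) (sentence : List String) : List Int :=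
  pvAltGo sentence (j_alpha - 1)

-- ===== PRECONDITION & SPEC =====
-- A raises IndexError exactly when j_alpha > len(sentence); those inputs are excluded.
def Pre_is_sothatORif_leftside (j_alpha : Int) (sentence : List String) : Prop :=
  j_alpha ≤ (sentence.length : Int)
instance (j_alpha : Int) (sentence : List String) : Decidable (Pre_is_sothatORif_leftside j_alpha sentence) := by unfold Pre_is_sothatORif_leftside; infer_instance

def pvWitness_is_sothatORif_leftside : Int × List String := (3, ["so", "that", "x"])

def Spec_is_sothatORif_leftside (j_alpha : Int) (sentence : List String) (out : List Int) : Prop := out = is_sothatORif_leftside_alt j_alpha sentence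
instance (j_alpha : Int) (sentence : List String) (out : List Int) : Decidable (Spec_is_sothatORif_leftside j_alpha sentence out) := by unfold Spec_is_sothatORif_leftside; infer_instance

-- ===== CLAIM (what is proved, stated in full; the proofs are below) =====
def Claim_equal_is_sothatORif_leftside : Prop := ∀ (j_alpha : Int) (sentence : List String), Dom_is_sothatORif_leftside j_alpha sentence → Pre_is_sothatORif_leftside j_alpha sentence → Spec_is_sothatORif_leftside j_alpha sentence (is_sothatORif_leftside j_alpha sentence)

-- ===== LEMMAS AND PROOFS =====

-- invariant of A's fold states: index stays < upper bound (starting from -1 < 0 ≤ bound)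
lemma pvFold_lt (step : (Bool × Int) → Int → Bool × Int)
    (hstep : ∀ st j, (step st j).2 = st.2 ∨ (step st j).2 = j)
    (a b : Int) (st : Bool × Int) (hst : st.2 < b) :
    ((PySem.List.pyRange a b 1).foldl step st).2 < b := by
  by_cases h : b ≤ a
  · rw [PySem.List.pyRange_one_eq_nil h]; exact hst
  · have : ∀ (k : Nat) (a : Int) (st : Bool × Int), (b - a).toNat = k → st.2 < b →
        ((PySem.List.pyRange a b 1).foldl step st).2 < b := by
      intro k
      induction k with
      | zero => intro a st hk hst
                rw [PySem.List.pyRange_one_eq_nil (by omega)]; exact hst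
      | succ k ih =>
          intro a st hk hst
          rw [PySem.List.pyRange_one_cons (by omega)]
          simp only [List.foldl_cons]
          refine ih (a + 1) _ (by omega) ?_
          rcases hstep st a with h' | h' <;> omega
    exact this (b - a).toNat a st rfl hst

lemma pvStepSo_snd (sentence : List String) (st : Bool × Int) (j : Int) :
    (pvStepSo sentence st j).2 = st.2 ∨ (pvStepSo sentence st j).2 = j := by
  unfold pvStepSo; split_ifs <;> simp

lemma pvStepIf_snd (sentence : List String) (st : Bool × Int) (j : Int) :
    (pvStepIf sentence st j).2 = st.2 ∨ (pvStepIf sentence st j).2 = j := by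
  unfold pvStepIf; split_ifs <;> simp

-- unfold one step at the RIGHT end of A's folds
lemma pvFold_snoc (step : (Bool × Int) → Int → Bool × Int) (a b : Int) (st : Bool × Int)
    (h : a ≤ b) :
    (PySem.List.pyRange a (b+1) 1).foldl step st =
    step ((PySem.List.pyRange a b 1).foldl step st) b := by
  rw [PySem.List.pyRange_one_succ_right h, List.foldl_append]; rfl

-- pvAltGo unfolded once for j ≥ 0
lemma pvAltGo_step (sentence : List String) (j : Int) (hj : 0 ≤ j) :
    pvAltGo sentence j =
      if (PySem.List.pyGet? sentence j).getD "" = "if" ∨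
         (PySem.List.pyGet? sentence j).getD "" = "when" then [0, 1]
      else if (PySem.List.pyGet? sentence j).getD "" = "so" ∧ j + 1 < (sentence.length : Int) ∧
              (PySem.List.pyGet? sentence (j+1)).getD "" = "that" then [1, 0]
      else pvAltGo sentence (j - 1) := by
  rw [pvAltGo, dif_neg (by omega : ¬ j < 0)]

-- main induction: for 0 ≤ k ≤ len, A's decision over the folds up to k equals B's backward scan from k-1
lemma pvMain (sentence : List String) :
    ∀ (n : Nat) (k : Int), k = (n : Int) → k ≤ (sentence.length : Int) →
      pvDecide ((PySem.List.pyRange 0 k 1).foldl (pvStepSo sentence) (false, -1))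
               ((PySem.List.pyRange 0 k 1).foldl (pvStepIf sentence) (false, -1))
        = pvAltGo sentence (k - 1) := by
  intro n
  induction n with
  | zero =>
      intro k hk _
      subst hk
      rw [PySem.List.pyRange_one_eq_nil (by omega)]
      rw [pvAltGo]
      simp [pvDecide]
  | succ m ih =>
      intro k hk hle
      subst hk
      have hm : (0:Int) ≤ (m:Int) := by positivity
      have hk1 : ((m+1 : Nat) : Int) = (m:Int) + 1 := by push_cast; ring
      rw [hk1]
      rw [pvFold_snoc _ 0 (m:Int) _ hm, pvFold_snoc _ 0 (m:Int) _ hm]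
      have hmlt : (m:Int) < (sentence.length : Int) := by
        rw [hk1] at hle; omega
      set s1 := (PySem.List.pyRange 0 (m:Int) 1).foldl (pvStepSo sentence) (false, -1) with hs1
      set s2 := (PySem.List.pyRange 0 (m:Int) 1).foldl (pvStepIf sentence) (false, -1) with hs2
      have hlt1 : s1.2 < (m:Int) :=
        pvFold_lt _ (pvStepSo_snd sentence) 0 (m:Int) _ (by omega)
      have hlt2 : s2.2 < (m:Int) :=
        pvFold_lt _ (pvStepIf_snd sentence) 0 (m:Int) _ (by omega)
      have hrec : pvDecide s1 s2 = pvAltGo sentence ((m:Int) - 1) := ih (m:Int) rfl (by omega)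
      have hgoal : ((m:Int) + 1) - 1 = (m:Int) := by ring
      rw [hgoal, pvAltGo_step sentence (m:Int) hm]
      by_cases hif : ((PySem.List.pyGet? sentence (m:Int)).getD "" = "if" ∨
                      (PySem.List.pyGet? sentence (m:Int)).getD "" = "when")
      · -- if/when fires at m: B returns [0,1]; A's second state becomes (true, m)
        have hsoF : ¬ ((PySem.List.pyGet? sentence (m:Int)).getD "" = "so" ∧
            (PySem.List.pyGet? sentence ((m:Int)+1)).getD "" = "that") := by
          rintro ⟨h1, _⟩
          rcases hif with h | h <;> rw [h1] at h <;> simp at h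
        have hstep2 : pvStepIf sentence s2 (m:Int) = (true, (m:Int)) := by
          unfold pvStepIf; rw [if_pos hif]
        have hstep1 : pvStepSo sentence s1 (m:Int) = s1 := by
          unfold pvStepSo
          split_ifs <;> rfl
        rw [hstep1, hstep2, if_pos hif]
        unfold pvDecide
        rcases hb : s1.1 with _ | _
        · simp
        · have : ¬ s1.2 > (m:Int) := by omega
          simp [this]
      · rw [if_neg hif]
        have hstep2 : pvStepIf sentence s2 (m:Int) = s2 := by
          unfold pvStepIf; rw [if_neg hif]
        by_cases hso : ((PySem.List.pyGet? sentence (m:Int)).getD "" = "so" ∧ (m:Int) + 1 < (sentence.length : Int) ∧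
            (PySem.List.pyGet? sentence ((m:Int)+1)).getD "" = "that")
        · -- 'so that' fires at m: B returns [1,0]; A's first state becomes (true, m)
          rw [if_pos hso]
          obtain ⟨h1, h2, h3⟩ := hso
          have hstep1 : pvStepSo sentence s1 (m:Int) = (true, (m:Int)) := by
            unfold pvStepSo
            rw [if_neg (by omega : ¬ (m:Int) = (sentence.length : Int) - 1), if_pos ⟨h1, h3⟩]
          rw [hstep1, hstep2]
          unfold pvDecide
          rcases hb : s2.1 with _ | _
          · simp
          · have hgt : ((m:Int) > s2.2) := by omega
            simp [hgt]
        · -- neither fires: states unchanged, recurse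
          rw [if_neg hso]
          have hstep1 : pvStepSo sentence s1 (m:Int) = s1 := by
            unfold pvStepSo
            split_ifs with h1 h2
            · rfl
            · exact absurd ⟨h2.1, by omega, h2.2⟩ hso
            · rfl
          rw [hstep1, hstep2, hrec]

-- ===== VERDICT (by name: the statement is the Claim_ definition above) =====
theorem is_sothatORif_leftside_spec : Claim_equal_is_sothatORif_leftside := by
  intro j_alpha sentence _ hpre
  unfold Spec_is_sothatORif_leftside is_sothatORif_leftside is_sothatORif_leftside_alt
  by_cases h : j_alpha ≤ 0
  · rw [PySem.List.pyRange_one_eq_nil h]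
    rw [pvAltGo]
    simp [pvDecide, show j_alpha - 1 < 0 by omega]
  · exact pvMain sentence j_alpha.toNat j_alpha (by omega) hpre
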